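-- pv_equiv track=rewrite | github.com/aashishrc/Data-Structures-Algorithms | Heaps/MaximumSumCombination.py | solve
-- ===== SOURCE A (Python) =====
-- import heapq
--
-- def solve(A, B, C):
--     A.sort(reverse=True)
--     B.sort(reverse=True)
--     max_heap = []
--     visited = set()
--     result = []
--
--     # Initialize the heap with the maximum sum from both arrays
--     heapq.heappush(max_heap, (-1 * (A[0] + B[0]), 0, 0))
--     visited.add((0, 0))
--
--     # Continue popping elements from the heap until we find C valid combinations
--     while len(result) < C:
--         current_sum, i, j = heapq.heappop(max_heap)
--         result.append(-1 * current_sum)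
--
--         # Explore the next possible combinations and add them to the heap if not visited
--         if i + 1 < len(A) and (i + 1, j) not in visited:
--             heapq.heappush(max_heap, (-1 * (A[i + 1] + B[j]), i + 1, j))
--             visited.add((i + 1, j))
--         if j + 1 < len(B) and (i, j + 1) not in visited:
--             heapq.heappush(max_heap, (-1 * (A[i] + B[j + 1]), i, j + 1))
--             visited.add((i, j + 1))
--
--     return result
-- ===== SOURCE B (Python) =====
-- def solve(A, B, C):
--     # Materialize-all-then-sort: sort both arrays in place (same observable
--     # mutation as the original), enumerate every pairwise sum, sort descending,
--     # and take the first C by indexing (so C > len(A)*len(B) still raises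
--     # IndexError, as the heap version does when its frontier runs dry).
--     A.sort(reverse=True)
--     B.sort(reverse=True)
--     sums = sorted((x + y for x in A for y in B), reverse=True)
--     return [sums[k] for k in range(C)]
-- ===== Notes on version B (the rewrite author's own statement) =====
-- stated objective: simpler
-- what changed: Replaces the lazy best-first heap/visited-set frontier with materialize-all-pairwise-sums, one descending sort, and take-first-C by indexing.
import Mathlib
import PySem

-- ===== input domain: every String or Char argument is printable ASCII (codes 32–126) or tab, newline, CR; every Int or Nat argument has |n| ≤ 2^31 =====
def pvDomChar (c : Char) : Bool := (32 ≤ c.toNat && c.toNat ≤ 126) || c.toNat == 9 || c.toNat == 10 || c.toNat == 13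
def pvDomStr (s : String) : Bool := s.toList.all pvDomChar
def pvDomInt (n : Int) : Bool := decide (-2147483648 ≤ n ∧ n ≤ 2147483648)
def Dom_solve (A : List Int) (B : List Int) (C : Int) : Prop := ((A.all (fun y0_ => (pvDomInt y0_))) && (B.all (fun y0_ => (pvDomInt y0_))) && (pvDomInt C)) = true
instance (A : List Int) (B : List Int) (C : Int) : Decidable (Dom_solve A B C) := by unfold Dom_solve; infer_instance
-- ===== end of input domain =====

-- B replaces A's lazy best-first heap/visited-set frontier by materialize-all-pairwise-sums,
-- one descending sort and take-the-first-C (objective: simpler). Both A and B sort the two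
-- argument lists in place (same observable mutation); the equivalence proved is about the
-- RETURN value.

-- ===== PORT A =====
-- Python tuple comparison (-sum, i, j) < (-sum', i', j'): lexicographic on Int triples.
def pyLt3 (x y : Int × Int × Int) : Bool :=
  decide (x.1 < y.1) ||
    (x.1 == y.1 && (decide (x.2.1 < y.2.1) || (x.2.1 == y.2.1 && decide (x.2.2 < y.2.2))))

-- heapq model: the heap is the bag of pushed entries; heappop removes the minimum
-- (unique in A's use since every entry carries its distinct (i, j)).
def popMin : List (Int × Int × Int) → Option ((Int × Int × Int) × List (Int × Int × Int))
  | [] => none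
  | x :: xs =>
    match popMin xs with
    | none => some (x, xs)
    | some (m, r) => if pyLt3 m x then some (m, x :: r) else some (x, xs)

-- the while loop; fuel = number of iterations still allowed (C.toNat suffices: each
-- iteration appends exactly one element to result). popMin = none is Python's
-- IndexError from heappop on an empty heap (outside Pre_solve).
def loopA (a b : List Int) (C : Int) :
    Nat → List (Int × Int × Int) → PySem.Set (Int × Int) → List Int → List Int
  | 0, _, _, res => res
  | fuel + 1, heap, vis, res =>
    if (res.length : Int) < C then
      match popMin heap with
      | none => res
      | some ((ns, i, j), h1) =>
        let res1 := res ++ [(-1) * ns]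
        let c1 : Bool := decide (i + 1 < (a.length : Int)) && !(PySem.Set.contains vis (i + 1, j))
        let h2 := if c1 then
            ((-1) * ((PySem.List.pyGet? a (i + 1)).getD 0 + (PySem.List.pyGet? b j).getD 0), i + 1, j) :: h1
          else h1
        let v2 := if c1 then PySem.Set.add vis (i + 1, j) else vis
        let c2 : Bool := decide (j + 1 < (b.length : Int)) && !(PySem.Set.contains v2 (i, j + 1))
        let h3 := if c2 then
            ((-1) * ((PySem.List.pyGet? a i).getD 0 + (PySem.List.pyGet? b (j + 1)).getD 0), i, j + 1) :: h2
          else h2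
        let v3 := if c2 then PySem.Set.add v2 (i, j + 1) else v2
        loopA a b C fuel h3 v3 res1
    else res

def solve (A : List Int) (B : List Int) (C : Int) : List Int :=
  let a := PySem.List.sorted A (fun x => x) true
  let b := PySem.List.sorted B (fun x => x) true
  let heap0 := [((-1) * ((PySem.List.pyGet? a 0).getD 0 + (PySem.List.pyGet? b 0).getD 0), (0 : Int), (0 : Int))]
  let vis0 := PySem.Set.add PySem.Set.empty ((0 : Int), (0 : Int))
  loopA a b C C.toNat heap0 vis0 []

-- ===== PORT B =====
def solve_alt (A : List Int) (B : List Int) (C : Int) : List Int :=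
  let a := PySem.List.sorted A (fun x => x) true
  let b := PySem.List.sorted B (fun x => x) true
  let sums := PySem.List.sorted (a.flatMap (fun x => b.map (fun y => x + y))) (fun s => s) true
  (PySem.List.pyRange 0 C 1).filterMap (fun k => PySem.List.pyGet? sums k)

-- ===== PRECONDITION & SPEC =====
-- A raises IndexError when A or B is empty (A[0]/B[0]) and when C exceeds the number
-- of pairs len(A)*len(B) (heappop on an exhausted frontier); exactly those inputs are excluded.
def Pre_solve (A : List Int) (B : List Int) (C : Int) : Prop :=
  A ≠ [] ∧ B ≠ [] ∧ C ≤ (A.length : Int) * (B.length : Int)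
instance (A : List Int) (B : List Int) (C : Int) : Decidable (Pre_solve A B C) := by
  unfold Pre_solve; infer_instance

def pvWitness_solve : List Int × List Int × Int := ([3, 1, 2], [5, 4], 4)

def Spec_solve (A : List Int) (B : List Int) (C : Int) (out : List Int) : Prop := out = solve_alt A B C
instance (A : List Int) (B : List Int) (C : Int) (out : List Int) : Decidable (Spec_solve A B C out) := by
  unfold Spec_solve; infer_instance

-- ===== CLAIM (what is proved, stated in full; the proofs are below) =====
def Claim_equal_solve : Prop := ∀ (A : List Int) (B : List Int) (C : Int),
  Dom_solve A B C → Pre_solve A B C → Spec_solve A B C (solve A B C)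
-- ===== LEMMAS AND PROOFS =====

def cellVal (a b : List Int) (c : Nat × Nat) : Int := a.getD c.1 0 + b.getD c.2 0
def cellLtB (a b : List Int) (c d : Nat × Nat) : Bool :=
  decide (cellVal a b d < cellVal a b c) ||
    (decide (cellVal a b c = cellVal a b d) &&
      (decide (c.1 < d.1) || (decide (c.1 = d.1) && decide (c.2 < d.2))))
def cellKey (a b : List Int) (c : Nat × Nat) : Int × Int × Int :=
  (-(cellVal a b c), (c.1 : Int), (c.2 : Int))
def allCells (N M : Nat) : List (Nat × Nat) :=
  (List.range N).flatMap (fun i => (List.range M).map (fun j => (i, j)))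
def sortedCells (a b : List Int) : List (Nat × Nat) :=
  (allCells a.length b.length).mergeSort (fun c d => !(cellLtB a b d c))
lemma pyLt3_iff (x y : Int × Int × Int) : pyLt3 x y = true ↔
    (x.1 < y.1 ∨ (x.1 = y.1 ∧ (x.2.1 < y.2.1 ∨ (x.2.1 = y.2.1 ∧ x.2.2 < y.2.2)))) := by
  simp [pyLt3]
lemma cellLtB_iff (a b : List Int) (c d : Nat × Nat) : cellLtB a b c d = true ↔
    (cellVal a b d < cellVal a b c ∨
      (cellVal a b c = cellVal a b d ∧ (c.1 < d.1 ∨ (c.1 = d.1 ∧ c.2 < d.2)))) := by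
  simp [cellLtB]
lemma pyLt3_cellKey (a b : List Int) (c d : Nat × Nat) :
    pyLt3 (cellKey a b c) (cellKey a b d) = cellLtB a b c d := by
  rw [Bool.eq_iff_iff, pyLt3_iff, cellLtB_iff]
  simp only [cellKey]
  omega
lemma cellLtB_asymm {a b : List Int} {c d : Nat × Nat} (h : cellLtB a b c d = true) :
    cellLtB a b d c = false := by
  rw [cellLtB_iff] at h
  rw [← Bool.not_eq_true, cellLtB_iff]
  omega
lemma cellLtB_of_ne {a b : List Int} {c d : Nat × Nat} (hne : c ≠ d)
    (h : cellLtB a b c d = false) : cellLtB a b d c = true := by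
  have h' : ¬ (cellLtB a b c d = true) := by simp [h]
  rw [cellLtB_iff] at h'
  rw [cellLtB_iff]
  rw [Ne, Prod.ext_iff] at hne
  omega
lemma mem_allCells {N M : Nat} {c : Nat × Nat} : c ∈ allCells N M ↔ c.1 < N ∧ c.2 < M := by
  cases c; simp [allCells]
lemma allCells_nodup (N M : Nat) : (allCells N M).Nodup := by
  unfold allCells
  rw [List.nodup_flatMap]
  refine ⟨fun i _ => (List.nodup_range).map ?_, ?_⟩
  · intro x y h; simpa using h
  · refine List.Pairwise.imp ?_ (List.pairwise_lt_range (n := N))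
    intro i j hij x hx hy
    simp only [List.mem_map, List.mem_range] at hx hy
    obtain ⟨u, _, rfl⟩ := hx
    obtain ⟨v, _, h⟩ := hy
    cases h; omega
lemma allCells_length (N M : Nat) : (allCells N M).length = N * M := by
  simp [allCells]
lemma sortedCells_perm (a b : List Int) : (sortedCells a b).Perm (allCells a.length b.length) :=
  List.mergeSort_perm _ _
lemma sortedCells_nodup (a b : List Int) : (sortedCells a b).Nodup :=
  (sortedCells_perm a b).nodup_iff.mpr (allCells_nodup _ _)
lemma sortedCells_length (a b : List Int) : (sortedCells a b).length = a.length * b.length := by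
  rw [(sortedCells_perm a b).length_eq, allCells_length]
lemma sortedCells_mem (a b : List Int) {c : Nat × Nat} :
    c ∈ sortedCells a b ↔ c.1 < a.length ∧ c.2 < b.length := by
  rw [(sortedCells_perm a b).mem_iff, mem_allCells]
lemma sortedCells_pairwise (a b : List Int) :
    (sortedCells a b).Pairwise (fun c d => cellLtB a b c d = true) := by
  have h := List.pairwise_mergeSort (le := fun c d => !(cellLtB a b d c))
      (fun x y z hxy hyz => ?_) (fun x y => ?_) (allCells a.length b.length)
  · have hn := sortedCells_nodup a b
    rw [List.pairwise_iff_getElem] at h ⊢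
    intro i j hi hj hij
    have hne : (sortedCells a b)[i] ≠ (sortedCells a b)[j] := by
      intro he
      exact absurd (List.Nodup.getElem_inj_iff hn |>.mp he) (by omega)
    have := h i j hi hj hij
    simp only [Bool.not_eq_true'] at this
    exact cellLtB_of_ne (by exact fun he => hne he.symm) this
  · -- trans of !(lt y x)
    simp only [Bool.not_eq_true'] at *
    by_cases hxz : cellLtB a b z x = true
    · exfalso
      rw [cellLtB_iff] at hxz
      have h1 : ¬ (cellLtB a b y x = true) := by simp [hxy]
      have h2 : ¬ (cellLtB a b z y = true) := by simp [hyz]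
      rw [cellLtB_iff] at h1 h2
      omega
    · simp [hxz]
  · by_cases hxy : cellLtB a b y x = true
    · have := cellLtB_asymm hxy
      simp [this]
    · simp [hxy]

lemma getD_desc {a : List Int} (ha : a.Pairwise (fun x y => y ≤ x)) {i j : Nat}
    (hij : i ≤ j) (hj : j < a.length) : a.getD j 0 ≤ a.getD i 0 := by
  rcases Nat.eq_or_lt_of_le hij with rfl | h
  · rfl
  · rw [List.getD_eq_getElem a 0 hj, List.getD_eq_getElem a 0 (lt_trans h hj)]
    exact (List.pairwise_iff_getElem.mp ha) i j _ hj h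

lemma cellLtB_mono_fst {a b : List Int} (ha : a.Pairwise (fun x y => y ≤ x)) {i i' j : Nat}
    (h : i < i') (h' : i' < a.length) : cellLtB a b (i, j) (i', j) = true := by
  rw [cellLtB_iff]
  simp only [cellVal]
  have := getD_desc ha (Nat.le_of_lt h) h'
  omega

lemma cellLtB_mono_snd {a b : List Int} (hb : b.Pairwise (fun x y => y ≤ x)) {i j j' : Nat}
    (h : j < j') (h' : j' < b.length) : cellLtB a b (i, j) (i, j') = true := by
  rw [cellLtB_iff]
  simp only [cellVal]
  simp only [true_and]
  have := getD_desc hb (Nat.le_of_lt h) h'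
  omega

lemma mem_take_lt {a b : List Int} {t : Nat} {x : Nat × Nat} (ht : t < (sortedCells a b).length)
    (hx : x ∈ (sortedCells a b).take t) : cellLtB a b x ((sortedCells a b)[t]) = true := by
  rw [List.mem_take_iff_getElem] at hx
  obtain ⟨p, hp, rfl⟩ := hx
  exact (List.pairwise_iff_getElem.mp (sortedCells_pairwise a b)) p t (by omega) ht (by omega)

lemma lt_getElem_mem_take {a b : List Int} {t : Nat} {x : Nat × Nat} (ht : t < (sortedCells a b).length)
    (hx : x ∈ sortedCells a b) (h : cellLtB a b x ((sortedCells a b)[t]) = true) :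
    x ∈ (sortedCells a b).take t := by
  rw [List.mem_iff_getElem] at hx
  obtain ⟨p, hp, rfl⟩ := hx
  rw [List.mem_take_iff_getElem]
  have hpt : p < t := by
    by_contra hge
    rcases Nat.eq_or_lt_of_le (Nat.le_of_not_lt hge) with rfl | hlt
    · rw [cellLtB_iff] at h; omega
    · have h2 := (List.pairwise_iff_getElem.mp (sortedCells_pairwise a b)) t p ht hp hlt
      have := cellLtB_asymm h2
      rw [h] at this
      cases this
  exact ⟨p, by omega, rfl⟩
lemma getElem_lt_mem_drop {a b : List Int} {t : Nat} {x : Nat × Nat} (ht : t < (sortedCells a b).length)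
    (hx : x ∈ (sortedCells a b).drop (t + 1)) : cellLtB a b ((sortedCells a b)[t]) x = true := by
  rw [List.mem_drop_iff_getElem] at hx
  obtain ⟨p, hp, rfl⟩ := hx
  exact (List.pairwise_iff_getElem.mp (sortedCells_pairwise a b)) t (t+1+p) ht (by omega) (by omega)

lemma mem_drop_of_mem_not_take {α : Type} {l : List α} {t : Nat} {x : α}
    (hx : x ∈ l) (h : x ∉ l.take t) : x ∈ l.drop t := by
  rw [← List.take_append_drop t l, List.mem_append] at hx
  tauto

lemma popMin_eq_none {l : List (Int × Int × Int)} : popMin l = none ↔ l = [] := by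
  cases l with
  | nil => simp [popMin]
  | cons x xs =>
    simp only [popMin]
    rcases h : popMin xs with _ | ⟨m, r⟩ <;> simp [h]
    split <;> simp

lemma pyLt3_trans_neg {x y z : Int × Int × Int} (h1 : pyLt3 y x = false) (h2 : pyLt3 z y = false) :
    pyLt3 z x = false := by
  have h1' : ¬ (pyLt3 y x = true) := by simp [h1]
  have h2' : ¬ (pyLt3 z y = true) := by simp [h2]
  rw [pyLt3_iff] at h1' h2'
  rw [← Bool.not_eq_true, pyLt3_iff]
  omega

lemma pyLt3_asymm {x y : Int × Int × Int} (h : pyLt3 x y = true) : pyLt3 y x = false := by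
  rw [pyLt3_iff] at h
  rw [← Bool.not_eq_true, pyLt3_iff]
  omega

lemma popMin_spec {l : List (Int × Int × Int)} {m : Int × Int × Int} {r : List (Int × Int × Int)}
    (h : popMin l = some (m, r)) :
    (m :: r).Perm l ∧ ∀ y ∈ l, pyLt3 y m = false := by
  induction l generalizing m r with
  | nil => simp [popMin] at h
  | cons x xs ih =>
    rw [popMin] at h
    rcases hx : popMin xs with _ | ⟨m', r'⟩ <;> rw [hx] at h <;> dsimp only at h
    · simp only [Option.some.injEq, Prod.mk.injEq] at h
      obtain ⟨rfl, rfl⟩ := h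
      have hnil := popMin_eq_none.mp hx
      subst hnil
      refine ⟨List.Perm.refl _, ?_⟩
      intro y hy
      simp only [List.mem_cons, List.not_mem_nil, or_false] at hy
      subst hy
      rw [← Bool.not_eq_true, pyLt3_iff]; omega
    · obtain ⟨hperm, hmin⟩ := ih hx
      by_cases hlt : pyLt3 m' x = true
      · rw [if_pos hlt] at h
        simp only [Option.some.injEq, Prod.mk.injEq] at h
        obtain ⟨rfl, rfl⟩ := h
        refine ⟨?_, ?_⟩
        · exact (List.Perm.swap x m' r').trans (hperm.cons x)
        · intro y hy
          rcases List.mem_cons.mp hy with rfl | hy'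
          · exact pyLt3_asymm hlt
          · exact hmin y hy'
      · rw [if_neg hlt] at h
        simp only [Option.some.injEq, Prod.mk.injEq] at h
        obtain ⟨rfl, rfl⟩ := h
        refine ⟨List.Perm.refl _, ?_⟩
        intro y hy
        rcases List.mem_cons.mp hy with rfl | hy'
        · rw [← Bool.not_eq_true, pyLt3_iff]; omega
        · have h1 := hmin y hy'
          exact pyLt3_trans_neg (by simpa using hlt) h1

lemma filter_or_perm {α : Type} (l : List α) (p q : α → Bool) :
    (l.filter (fun x => p x || q x)).Perm (l.filter p ++ l.filter (fun x => q x && !p x)) := by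
  induction l with
  | nil => simp
  | cons x l ih =>
    by_cases hp : p x <;> by_cases hq : q x <;>
      simp only [List.filter_cons, hp, hq, Bool.true_or, Bool.false_or, Bool.or_true, Bool.or_false,
        Bool.true_and, Bool.false_and, Bool.and_true, Bool.and_false, Bool.not_true, Bool.not_false,
        if_true, if_false, cond_true, cond_false]
    · exact ih.cons x
    · exact ih.cons x
    · exact (ih.cons x).trans (List.perm_middle).symm
    · exact ih

lemma filter_eq_singleton_of_nodup {α : Type} {l : List α} {q : α → Bool} {x : α}
    (hn : l.Nodup) (hx : x ∈ l) (hq : ∀ y ∈ l, q y = true ↔ y = x) : l.filter q = [x] := by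
  induction l with
  | nil => simp at hx
  | cons z l ih =>
    rcases List.mem_cons.mp hx with rfl | hx'
    · rw [List.filter_cons_of_pos ((hq _ (by simp)).mpr rfl), List.filter_eq_nil_iff.mpr]
      intro y hy
      rw [hq y (by simp [hy])]
      intro he; subst he
      exact (List.nodup_cons.mp hn).1 hy
    · rw [List.filter_cons_of_neg, ih (List.nodup_cons.mp hn).2 hx'
        (fun y hy => hq y (by simp [hy]))]
      rw [hq _ (by simp)]
      intro he; subst he
      exact (List.nodup_cons.mp hn).1 hx'

def frB (P : List (Nat × Nat)) (c : Nat × Nat) : Bool :=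
  decide (c = (0, 0)) || (decide (0 < c.1) && decide ((c.1 - 1, c.2) ∈ P)) ||
    (decide (0 < c.2) && decide ((c.1, c.2 - 1) ∈ P))

def pvFrontier (a b : List Int) (t : Nat) : List (Nat × Nat) :=
  ((sortedCells a b).drop t).filter (frB ((sortedCells a b).take t))

lemma head_mem_frontier {a b : List Int} (ha : a.Pairwise (fun x y => y ≤ x))
    (hb : b.Pairwise (fun x y => y ≤ x)) {t : Nat} (ht : t < (sortedCells a b).length) :
    frB ((sortedCells a b).take t) ((sortedCells a b)[t]) = true := by
  set c := (sortedCells a b)[t] with hc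
  have hcmem : c ∈ sortedCells a b := List.getElem_mem ht
  have hcr := (sortedCells_mem a b).mp hcmem
  by_cases h0 : c = (0, 0)
  · simp [frB, h0]
  · have h1 : 0 < c.1 ∨ (c.1 = 0 ∧ 0 < c.2) := by
      rcases c with ⟨c1, c2⟩
      rcases Nat.eq_zero_or_pos c1 with rfl | h
      · rcases Nat.eq_zero_or_pos c2 with rfl | h2
        · exact absurd rfl h0
        · exact Or.inr ⟨rfl, h2⟩
      · exact Or.inl h
    rcases h1 with h1 | ⟨h1, h2⟩
    · -- up predecessor
      have hup : ((c.1 - 1, c.2) : Nat × Nat) ∈ sortedCells a b := by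
        rw [sortedCells_mem]; exact ⟨by omega, hcr.2⟩
      have hlt : cellLtB a b (c.1 - 1, c.2) c = true := by
        have := cellLtB_mono_fst (b := b) ha (i := c.1 - 1) (i' := c.1) (j := c.2) (by omega) hcr.1
        simpa using this
      have := lt_getElem_mem_take ht hup (by rw [← hc]; exact hlt)
      simp [frB, h1, this]
    · have hleft : ((c.1, c.2 - 1) : Nat × Nat) ∈ sortedCells a b := by
        rw [sortedCells_mem]; exact ⟨hcr.1, by omega⟩
      have hlt : cellLtB a b (c.1, c.2 - 1) c = true := by
        have := cellLtB_mono_snd (a := a) hb (i := c.1) (j := c.2 - 1) (j' := c.2) (by omega) hcr.2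
        simpa using this
      have := lt_getElem_mem_take ht hleft (by rw [← hc]; exact hlt)
      simp [frB, h2, this]

lemma self_eq_map_range (l : List Int) :
    l = (List.range l.length).map (fun i => l.getD i 0) := by
  apply List.ext_getElem
  · simp
  · intro i h1 h2
    simp only [List.getElem_map, List.getElem_range]
    rw [List.getD_eq_getElem l 0 (by simpa using h1)]

lemma flatMap_eq_map_allCells (a b : List Int) :
    a.flatMap (fun x => b.map (fun y => x + y)) = (allCells a.length b.length).map (cellVal a b) := by
  conv_lhs => rw [self_eq_map_range a, self_eq_map_range b]
  simp only [List.flatMap_map, List.map_map, Function.comp_def]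
  simp only [allCells, List.map_flatMap, List.map_map, Function.comp_def, cellVal]

lemma sums_eq (a b : List Int) :
    PySem.List.sorted (a.flatMap (fun x => b.map (fun y => x + y))) (fun s => s) true
      = (sortedCells a b).map (cellVal a b) := by
  apply PySem.List.eq_of_perm_of_pairwise_le_of_injective (key := fun s : Int => -s) neg_injective
  · refine (PySem.List.sorted_perm _ _ _).trans ?_
    rw [flatMap_eq_map_allCells]
    exact (((sortedCells_perm a b).map (cellVal a b)).symm)
  · have h := PySem.List.sorted_pairwise_rev (a.flatMap (fun x => b.map (fun y => x + y))) (fun s : Int => s)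
    exact h.imp (by intro x y hxy; simpa using hxy)
  · have h := (sortedCells_pairwise a b).map (f := cellVal a b)
      (S := fun x y => -x ≤ -y) ?_
    · exact h
    · intro c d hcd
      rw [cellLtB_iff] at hcd
      omega

lemma filterMap_pyRange_take (l : List Int) (C : Int) (h : C ≤ (l.length : Int)) :
    (PySem.List.pyRange 0 C 1).filterMap (fun k => PySem.List.pyGet? l k) = l.take C.toNat := by
  by_cases hC : C ≤ 0
  · have h1 : PySem.List.pyRange 0 C 1 = [] := by
      simp only [PySem.List.pyRange]
      rw [if_neg (by norm_num)]
      rw [if_pos (by norm_num), if_neg (by omega)]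
      simp
    rw [h1]
    have : C.toNat = 0 := by omega
    simp [this]
  · have h1 : C = ((C.toNat : Nat) : Int) := by omega
    rw [h1, PySem.List.pyRange_zero_natCast, List.filterMap_map]
    have h2 : ∀ n (hn : n ≤ l.length), (List.range n).filterMap ((fun k => PySem.List.pyGet? l k) ∘ (fun k : Nat => (k : Int))) = l.take n := by
      intro n
      induction n with
      | zero => simp
      | succ n ih =>
        intro hn
        rw [List.range_succ, List.filterMap_append, ih (by omega), List.take_add_one]
        simp only [List.filterMap_cons, Function.comp_apply, PySem.List.pyGet?_natCast]
        rw [List.getElem?_eq_getElem (by omega)]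
        simp
    rw [h2 C.toNat (by omega)]
    norm_num
    omega

def cellIdx (c : Nat × Nat) : Int × Int := ((c.1 : Int), (c.2 : Int))

lemma cellIdx_inj {c d : Nat × Nat} (h : cellIdx c = cellIdx d) : c = d := by
  rcases c with ⟨c1, c2⟩; rcases d with ⟨d1, d2⟩
  simp only [cellIdx, Prod.mk.injEq] at h ⊢
  omega

lemma frB_append_singleton (P : List (Nat × Nat)) (e c : Nat × Nat) :
    frB (P ++ [e]) c = (frB P c ||
      (decide (0 < c.1) && decide ((c.1 - 1, c.2) = e)) ||
      (decide (0 < c.2) && decide ((c.1, c.2 - 1) = e))) := by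
  rw [Bool.eq_iff_iff]
  simp only [frB, List.mem_append, List.mem_singleton, Bool.or_eq_true, Bool.and_eq_true,
    decide_eq_true_eq]
  tauto

lemma drop_nodup {α : Type} {l : List α} (h : l.Nodup) (t : Nat) : (l.drop t).Nodup :=
  h.sublist (List.drop_sublist t l)

lemma not_mem_take_succ_of_gt {a b : List Int} {t : Nat} (htlt : t < (sortedCells a b).length)
    {x : Nat × Nat} (h : cellLtB a b ((sortedCells a b)[t]) x = true) :
    x ∉ (sortedCells a b).take (t + 1) := by
  intro hx
  rw [List.take_add_one, List.getElem?_eq_getElem htlt] at hx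
  rcases List.mem_append.mp hx with hx' | hx'
  · have h2 := mem_take_lt htlt hx'
    have h3 := cellLtB_asymm h2
    rw [h3] at h
    cases h
  · simp only [Option.toList_some, List.mem_singleton] at hx'
    subst hx'
    have := cellLtB_asymm h
    rw [h] at this
    cases this

lemma mem_drop_succ_of_gt {a b : List Int} {t : Nat} (htlt : t < (sortedCells a b).length)
    {x : Nat × Nat} (hx : x ∈ sortedCells a b)
    (h : cellLtB a b ((sortedCells a b)[t]) x = true) :
    x ∈ (sortedCells a b).drop (t + 1) :=
  mem_drop_of_mem_not_take hx (not_mem_take_succ_of_gt htlt h)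

lemma cellLtB_down {a b : List Int} (ha : a.Pairwise (fun x y => y ≤ x))
    {c : Nat × Nat} (h : c.1 + 1 < a.length) : cellLtB a b c (c.1 + 1, c.2) = true := by
  have := cellLtB_mono_fst (b := b) ha (i := c.1) (i' := c.1 + 1) (j := c.2) (by omega) h
  rcases c with ⟨c1, c2⟩
  exact this

lemma cellLtB_right {a b : List Int} (hb : b.Pairwise (fun x y => y ≤ x))
    {c : Nat × Nat} (h : c.2 + 1 < b.length) : cellLtB a b c (c.1, c.2 + 1) = true := by
  have := cellLtB_mono_snd (a := a) hb (i := c.1) (j := c.2) (j' := c.2 + 1) (by omega) h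
  rcases c with ⟨c1, c2⟩
  exact this

lemma frontier_succ {a b : List Int} (ha : a.Pairwise (fun x y => y ≤ x))
    (hb : b.Pairwise (fun x y => y ≤ x)) {t : Nat} (htlt : t < (sortedCells a b).length) :
    (pvFrontier a b (t + 1)).Perm
      ((((sortedCells a b).drop (t + 1)).filter (frB ((sortedCells a b).take t))
        ++ (if ((sortedCells a b)[t].1 + 1 < a.length ∧
              frB ((sortedCells a b).take t) ((sortedCells a b)[t].1 + 1, (sortedCells a b)[t].2) = false)
            then [((sortedCells a b)[t].1 + 1, (sortedCells a b)[t].2)] else []))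
        ++ (if ((sortedCells a b)[t].2 + 1 < b.length ∧
              frB ((sortedCells a b).take t) ((sortedCells a b)[t].1, (sortedCells a b)[t].2 + 1) = false)
            then [((sortedCells a b)[t].1, (sortedCells a b)[t].2 + 1)] else [])) := by
  set L := sortedCells a b with hL
  set cstar := L[t] with hcstar
  set P := L.take t with hP
  set p := frB P with hp
  set q1 : Nat × Nat → Bool := fun c => decide (0 < c.1) && decide ((c.1 - 1, c.2) = cstar) with hq1
  set q2 : Nat × Nat → Bool := fun c => decide (0 < c.2) && decide ((c.1, c.2 - 1) = cstar) with hq2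
  have hdn : (L.drop (t + 1)).Nodup := drop_nodup (sortedCells_nodup a b) (t + 1)
  have hcmem : cstar ∈ L := List.getElem_mem htlt
  have hcr := (sortedCells_mem a b).mp hcmem
  have hstep : pvFrontier a b (t + 1)
      = (L.drop (t + 1)).filter (fun c => p c || (q1 c || q2 c)) := by
    unfold pvFrontier
    apply List.filter_congr
    intro c _
    rw [List.take_add_one, List.getElem?_eq_getElem htlt]
    simp only [Option.toList_some]
    rw [frB_append_singleton]
    rw [Bool.eq_iff_iff]
    simp only [Bool.or_eq_true]
    tauto
  rw [hstep, List.append_assoc]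
  refine (filter_or_perm _ p (fun c => q1 c || q2 c)).trans ?_
  refine List.Perm.append_left _ ?_
  have hsplit : (L.drop (t + 1)).filter (fun c => (q1 c || q2 c) && !p c)
      = (L.drop (t + 1)).filter (fun c => (q1 c && !p c) || (q2 c && !p c)) := by
    apply List.filter_congr
    intro c _
    cases hq1c : q1 c <;> cases hq2c : q2 c <;> cases hpc : p c <;> rfl
  rw [hsplit]
  refine (filter_or_perm _ (fun c => q1 c && !p c) (fun c => q2 c && !p c)).trans ?_
  have hq1y : ∀ y : Nat × Nat, q1 y = true ↔ (0 < y.1 ∧ y.1 - 1 = cstar.1 ∧ y.2 = cstar.2) := by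
    intro y
    simp only [hq1, Bool.and_eq_true, decide_eq_true_eq, Prod.ext_iff, and_assoc]
  have hq2y : ∀ y : Nat × Nat, q2 y = true ↔ (0 < y.2 ∧ y.1 = cstar.1 ∧ y.2 - 1 = cstar.2) := by
    intro y
    simp only [hq2, Bool.and_eq_true, decide_eq_true_eq, Prod.ext_iff, and_assoc]
  have hpair : ∀ (y : Nat × Nat) (u v : Nat), y = (u, v) ↔ (y.1 = u ∧ y.2 = v) := by
    intro y u v; rw [Prod.ext_iff]
  apply List.Perm.append
  · by_cases hd : cstar.1 + 1 < a.length ∧ p (cstar.1 + 1, cstar.2) = false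
    · rw [if_pos hd]
      apply List.Perm.of_eq
      apply filter_eq_singleton_of_nodup hdn
      · exact mem_drop_succ_of_gt htlt (by rw [sortedCells_mem]; exact ⟨hd.1, hcr.2⟩)
          (cellLtB_down ha hd.1)
      · intro y _
        rw [Bool.and_eq_true, Bool.not_eq_true', hq1y, hpair]
        constructor
        · rintro ⟨⟨h0, h1, h2⟩, _⟩
          omega
        · rintro ⟨e1, e2⟩
          have hy : y = (cstar.1 + 1, cstar.2) := by rw [hpair]; exact ⟨e1, e2⟩
          subst hy
          exact ⟨⟨by omega, by omega, rfl⟩, hd.2⟩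
    · rw [if_neg hd]
      apply List.Perm.of_eq
      rw [List.filter_eq_nil_iff]
      intro y hy hcon
      rw [Bool.and_eq_true, Bool.not_eq_true', hq1y] at hcon
      obtain ⟨⟨h0, h1, h2⟩, h3⟩ := hcon
      have hyeq : y = (cstar.1 + 1, cstar.2) := by rw [hpair]; omega
      apply hd
      subst hyeq
      have hymem := (sortedCells_mem a b).mp (List.mem_of_mem_drop hy)
      exact ⟨hymem.1, h3⟩
  · by_cases hr : cstar.2 + 1 < b.length ∧ p (cstar.1, cstar.2 + 1) = false
    · rw [if_pos hr]
      apply List.Perm.of_eq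
      apply filter_eq_singleton_of_nodup hdn
      · exact mem_drop_succ_of_gt htlt (by rw [sortedCells_mem]; exact ⟨hcr.1, hr.1⟩)
          (cellLtB_right hb hr.1)
      · intro y _
        rw [Bool.and_eq_true, Bool.not_eq_true']
        constructor
        · rintro ⟨hA, _⟩
          rw [Bool.and_eq_true, Bool.not_eq_true', hq2y] at hA
          obtain ⟨⟨h0, h1, h2⟩, _⟩ := hA
          rw [hpair]
          omega
        · intro hy
          have hq1v : q1 (cstar.1, cstar.2 + 1) = false := by
            cases hq1v : q1 (cstar.1, cstar.2 + 1)
            · rfl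
            · exfalso
              rw [hq1y] at hq1v
              obtain ⟨_, _, h2⟩ := hq1v
              simp only at h2
              omega
          subst hy
          constructor
          · rw [Bool.and_eq_true, Bool.not_eq_true', hq2y]
            exact ⟨⟨by omega, rfl, by omega⟩, hr.2⟩
          · rw [hq1v]
            rfl
    · rw [if_neg hr]
      apply List.Perm.of_eq
      rw [List.filter_eq_nil_iff]
      intro y hy hcon
      rw [Bool.and_eq_true] at hcon
      obtain ⟨hA, _⟩ := hcon
      rw [Bool.and_eq_true, Bool.not_eq_true', hq2y] at hA
      obtain ⟨⟨h0, h1, h2⟩, h3⟩ := hA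
      have hyeq : y = (cstar.1, cstar.2 + 1) := by rw [hpair]; omega
      apply hr
      subst hyeq
      have hymem := (sortedCells_mem a b).mp (List.mem_of_mem_drop hy)
      exact ⟨hymem.2, h3⟩

lemma frontier_cons {a b : List Int} (ha : a.Pairwise (fun x y => y ≤ x))
    (hb : b.Pairwise (fun x y => y ≤ x)) {t : Nat} (htlt : t < (sortedCells a b).length) :
    pvFrontier a b t = (sortedCells a b)[t] ::
      (((sortedCells a b).drop (t + 1)).filter (frB ((sortedCells a b).take t))) := by
  unfold pvFrontier
  rw [List.drop_eq_getElem_cons htlt, List.filter_cons_of_pos (head_mem_frontier ha hb htlt)]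

lemma cellLtB_irrefl (a b : List Int) (c : Nat × Nat) : cellLtB a b c c = false := by
  rw [← Bool.not_eq_true, cellLtB_iff]
  omega

lemma pyGetD_eq_getD (l : List Int) (n : Nat) (h : n < l.length) :
    (PySem.List.pyGet? l ((n : Int))).getD 0 = l.getD n 0 := by
  rw [PySem.List.pyGet?_natCast, List.getElem?_eq_getElem h, List.getD_eq_getElem l 0 h]
  rfl

lemma mem_vis_iff_frB {a b : List Int} (ha : a.Pairwise (fun x y => y ≤ x))
    (hb : b.Pairwise (fun x y => y ≤ x)) {t : Nat} (htlt : t < (sortedCells a b).length)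
    {vis : PySem.Set (Int × Int)}
    (hvis : ∀ x : Int × Int, x ∈ vis ↔ ∃ c, c ∈ allCells a.length b.length ∧ cellIdx c = x ∧
        (c ∈ (sortedCells a b).take t ∨ c ∈ pvFrontier a b t))
    {e : Nat × Nat} (he : e ∈ sortedCells a b)
    (hgt : cellLtB a b ((sortedCells a b)[t]) e = true) :
    (cellIdx e ∈ vis) ↔ frB ((sortedCells a b).take t) e = true := by
  rw [hvis]
  have heall : e ∈ allCells a.length b.length := (sortedCells_perm a b).subset he
  have hent : e ∉ (sortedCells a b).take t := by
    intro hc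
    have := cellLtB_asymm (mem_take_lt htlt hc)
    rw [hgt] at this
    cases this
  have hene : e ≠ (sortedCells a b)[t] := by
    intro hc
    rw [← hc, cellLtB_irrefl] at hgt
    cases hgt
  have hdrop : e ∈ (sortedCells a b).drop (t + 1) := mem_drop_succ_of_gt htlt he hgt
  constructor
  · rintro ⟨c, hcall, hcix, hc⟩
    have hce : c = e := cellIdx_inj hcix
    subst hce
    rcases hc with hc | hc
    · exact absurd hc hent
    · rw [frontier_cons ha hb htlt] at hc
      rcases List.mem_cons.mp hc with hc | hc
      · exact absurd hc hene
      · exact (List.mem_filter.mp hc).2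
  · intro hf
    refine ⟨e, heall, rfl, Or.inr ?_⟩
    rw [frontier_cons ha hb htlt]
    exact List.mem_cons_of_mem _ (List.mem_filter.mpr ⟨hdrop, hf⟩)

lemma cons_perm_append {α : Type} (x : α) {l m : List α} (h : l.Perm m) :
    (x :: l).Perm (m ++ [x]) :=
  (h.cons x).trans (List.perm_append_singleton x m).symm

lemma cons_cons_perm {α : Type} (x y : α) {l m : List α} (h : l.Perm m) :
    (x :: y :: l).Perm ((m ++ [y]) ++ [x]) :=
  ((cons_perm_append y h).cons x).trans (List.perm_append_singleton x (m ++ [y])).symm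

set_option maxHeartbeats 2000000 in
lemma loopA_inv (a b : List Int) (C : Int)
    (ha : a.Pairwise (fun x y => y ≤ x)) (hb : b.Pairwise (fun x y => y ≤ x))
    (hC : C.toNat ≤ a.length * b.length) :
    ∀ (fuel t : Nat) (heap : List (Int × Int × Int)) (vis : PySem.Set (Int × Int)),
    t + fuel = C.toNat →
    heap.Perm ((pvFrontier a b t).map (cellKey a b)) →
    (∀ x : Int × Int, x ∈ vis ↔ ∃ c, c ∈ allCells a.length b.length ∧ cellIdx c = x ∧
        (c ∈ (sortedCells a b).take t ∨ c ∈ pvFrontier a b t)) →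
    loopA a b C fuel heap vis (((sortedCells a b).take t).map (cellVal a b))
      = ((sortedCells a b).take C.toNat).map (cellVal a b) := by
  intro fuel
  induction fuel with
  | zero =>
    intro t heap vis ht _ _
    have htC : t = C.toNat := by omega
    subst htC
    rfl
  | succ fuel ih =>
    intro t heap vis ht hheap hvis
    have hLlen : (sortedCells a b).length = a.length * b.length := sortedCells_length a b
    have htlt : t < (sortedCells a b).length := by omega
    set L := sortedCells a b with hLdef
    set cstar := L[t] with hcstar
    have hcmem : cstar ∈ L := List.getElem_mem htlt
    have hcr := (sortedCells_mem a b).mp hcmem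
    have hfr := frontier_cons ha hb htlt
    -- unfold one iteration
    rw [loopA]
    rw [if_pos (by simp only [List.length_map, List.length_take]; omega)]
    -- the pop
    have hne : heap ≠ [] := by
      intro h0
      rw [h0] at hheap
      have := hheap.symm.length_eq
      rw [hfr] at this
      simp at this
    rcases hpop : popMin heap with _ | ⟨⟨ns, i, j⟩, h1⟩
    · exact absurd (popMin_eq_none.mp hpop) hne
    obtain ⟨hperm1, hmin⟩ := popMin_spec hpop
    have hck_mem : cellKey a b cstar ∈ heap := by
      apply hheap.symm.subset
      apply List.mem_map_of_mem
      rw [hfr]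
      exact List.mem_cons_self
    have hmkey : cellKey a b cstar = (ns, i, j) := by
      have hm_mem : (ns, i, j) ∈ heap := hperm1.subset List.mem_cons_self
      obtain ⟨d, hdF, hdk⟩ := List.mem_map.mp (hheap.subset hm_mem)
      have hd : d = cstar := by
        by_contra hned
        have hd2 : d ∈ L.drop (t + 1) := by
          rw [hfr] at hdF
          rcases List.mem_cons.mp hdF with h | h
          · exact absurd h hned
          · exact List.mem_of_mem_filter h
        have hlt := getElem_lt_mem_drop htlt hd2
        have hnolt := hmin _ hck_mem
        rw [← hdk, pyLt3_cellKey] at hnolt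
        rw [← hcstar] at hlt
        rw [hnolt] at hlt
        cases hlt
      rw [← hd, hdk]
    have hns : ns = -(cellVal a b cstar) := by
      have := congrArg Prod.fst hmkey; simpa [cellKey] using this.symm
    have hi : i = (cstar.1 : Int) := by
      have := congrArg (fun p => p.2.1) hmkey; simpa [cellKey] using this.symm
    have hj : j = (cstar.2 : Int) := by
      have := congrArg (fun p => p.2.2) hmkey; simpa [cellKey] using this.symm
    -- res1
    have hres1 : (((L.take t).map (cellVal a b)) ++ [(-1) * ns])
        = (L.take (t + 1)).map (cellVal a b) := by
      rw [List.take_add_one, List.getElem?_eq_getElem htlt]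
      simp only [Option.toList_some, List.map_append, List.map_cons, List.map_nil]
      rw [hns]
      norm_num
      rw [hcstar]
    -- h1 against the filtered frontier
    set filt := (L.drop (t + 1)).filter (frB (L.take t)) with hfiltdef
    have hh1 : h1.Perm (filt.map (cellKey a b)) := by
      have hheap' : heap.Perm (cellKey a b cstar :: filt.map (cellKey a b)) := by
        rw [hfr] at hheap
        simpa using hheap
      rw [← hmkey] at hperm1
      exact (hperm1.trans hheap').cons_inv
    -- conditions
    set down : Nat × Nat := (cstar.1 + 1, cstar.2) with hdown
    set right : Nat × Nat := (cstar.1, cstar.2 + 1) with hright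
    have hPd_iff : (decide (i + 1 < (a.length : Int)) && !(PySem.Set.contains vis (i + 1, j))) = true
        ↔ (cstar.1 + 1 < a.length ∧ frB (L.take t) down = false) := by
      rw [hi, hj]
      simp only [Bool.and_eq_true, decide_eq_true_eq, Bool.not_eq_true']
      constructor
      · rintro ⟨h1', h2'⟩
        have hN : cstar.1 + 1 < a.length := by omega
        refine ⟨hN, ?_⟩
        have hmem := mem_vis_iff_frB ha hb htlt hvis
          (e := down) (by rw [sortedCells_mem]; exact ⟨hN, hcr.2⟩) (cellLtB_down ha hN)
        rw [← Bool.not_eq_true]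
        intro hf
        have hmm : cellIdx down ∈ vis := hmem.mpr hf
        rw [← PySem.Set.contains_iff] at hmm
        have hxe : ((cstar.1 : Int) + 1, (cstar.2 : Int)) = cellIdx down := by
          simp only [cellIdx, hdown, Prod.mk.injEq]
          constructor <;> push_cast <;> ring
        rw [hxe] at h2'
        rw [h2'] at hmm
        exact Bool.noConfusion hmm
      · rintro ⟨hN, hf⟩
        refine ⟨by omega, ?_⟩
        have hmem := mem_vis_iff_frB ha hb htlt hvis
          (e := down) (by rw [sortedCells_mem]; exact ⟨hN, hcr.2⟩) (cellLtB_down ha hN)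
        have hxe : ((cstar.1 : Int) + 1, (cstar.2 : Int)) = cellIdx down := by
          simp only [cellIdx, hdown, Prod.mk.injEq]
          constructor <;> push_cast <;> ring
        rw [hxe, ← Bool.not_eq_true, PySem.Set.contains_iff, hmem, hf]
        simp
    have hIdxD : ((i + 1 : Int), j) = cellIdx down := by
      rw [hi, hj]
      simp only [cellIdx, hdown, Prod.mk.injEq]
      constructor <;> push_cast <;> ring
    have hIdxR : ((i : Int), j + 1) = cellIdx right := by
      rw [hi, hj]
      simp only [cellIdx, hright, Prod.mk.injEq]
      constructor <;> push_cast <;> ring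
    have hIdxDR : cellIdx down ≠ cellIdx right := by
      rw [hdown, hright]
      intro hcon
      have h1 := congrArg Prod.fst hcon
      simp only [cellIdx] at h1
      omega
    have hkd : cstar.1 + 1 < a.length →
        ((-1) * ((PySem.List.pyGet? a (i + 1)).getD 0 + (PySem.List.pyGet? b j).getD 0), i + 1, j)
          = cellKey a b down := by
      intro hN
      have hc1 : (i + 1 : Int) = ((cstar.1 + 1 : Nat) : Int) := by rw [hi]; push_cast; ring
      rw [hc1, hj, pyGetD_eq_getD a _ hN, pyGetD_eq_getD b _ hcr.2]
      simp only [cellKey, cellVal, hdown, Prod.mk.injEq]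
      exact ⟨by ring, trivial⟩
    have hkr : cstar.2 + 1 < b.length →
        ((-1) * ((PySem.List.pyGet? a i).getD 0 + (PySem.List.pyGet? b (j + 1)).getD 0), i, j + 1)
          = cellKey a b right := by
      intro hN
      have hc1 : (j + 1 : Int) = ((cstar.2 + 1 : Nat) : Int) := by rw [hj]; push_cast; ring
      rw [hc1, hi, pyGetD_eq_getD b _ hN, pyGetD_eq_getD a _ hcr.1]
      simp only [cellKey, cellVal, hright, Prod.mk.injEq]
      exact ⟨by ring, trivial⟩
    have hv2c : PySem.Set.contains
        (if (decide (i + 1 < (a.length : Int)) && !(PySem.Set.contains vis (i + 1, j)))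
          then PySem.Set.add vis (i + 1, j) else vis) (i, j + 1)
        = PySem.Set.contains vis (i, j + 1) := by
      split
      · rw [Bool.eq_iff_iff, PySem.Set.contains_iff, PySem.Set.contains_iff, PySem.Set.mem_add]
        constructor
        · rintro (h | h)
          · exact h
          · exfalso
            rw [hIdxR, hIdxD] at h
            exact hIdxDR h.symm
        · exact Or.inl
      · rfl
    have hPr_iff : (decide (j + 1 < (b.length : Int)) && !(PySem.Set.contains vis (i, j + 1))) = true
        ↔ (cstar.2 + 1 < b.length ∧ frB (L.take t) right = false) := by
      rw [hi, hj]
      simp only [Bool.and_eq_true, decide_eq_true_eq, Bool.not_eq_true']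
      constructor
      · rintro ⟨h1', h2'⟩
        have hN : cstar.2 + 1 < b.length := by omega
        refine ⟨hN, ?_⟩
        have hmem := mem_vis_iff_frB ha hb htlt hvis
          (e := right) (by rw [sortedCells_mem]; exact ⟨hcr.1, hN⟩) (cellLtB_right hb hN)
        rw [← Bool.not_eq_true]
        intro hf
        have hmm : cellIdx right ∈ vis := hmem.mpr hf
        rw [← PySem.Set.contains_iff] at hmm
        have hxe : ((cstar.1 : Int), (cstar.2 : Int) + 1) = cellIdx right := by
          simp only [cellIdx, hright, Prod.mk.injEq]
          constructor <;> push_cast <;> ring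
        rw [hxe] at h2'
        rw [h2'] at hmm
        exact Bool.noConfusion hmm
      · rintro ⟨hN, hf⟩
        refine ⟨by omega, ?_⟩
        have hmem := mem_vis_iff_frB ha hb htlt hvis
          (e := right) (by rw [sortedCells_mem]; exact ⟨hcr.1, hN⟩) (cellLtB_right hb hN)
        have hxe : ((cstar.1 : Int), (cstar.2 : Int) + 1) = cellIdx right := by
          simp only [cellIdx, hright, Prod.mk.injEq]
          constructor <;> push_cast <;> ring
        rw [hxe, ← Bool.not_eq_true, PySem.Set.contains_iff, hmem, hf]
        simp
    have htake1 : ∀ c : Nat × Nat, c ∈ L.take (t + 1) ↔ c ∈ L.take t ∨ c = cstar := by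
      intro c
      rw [List.take_add_one, List.getElem?_eq_getElem htlt]
      simp [← hcstar]
    have hF1 : ∀ c : Nat × Nat, c ∈ pvFrontier a b (t + 1) ↔
        (c ∈ filt ∨ ((cstar.1 + 1 < a.length ∧ frB (L.take t) down = false) ∧ c = down)
          ∨ ((cstar.2 + 1 < b.length ∧ frB (L.take t) right = false) ∧ c = right)) := by
      intro c
      rw [(frontier_succ ha hb htlt).mem_iff]
      simp only [← hLdef, ← hcstar, ← hdown, ← hright, ← hfiltdef, List.mem_append]
      by_cases hPd : (cstar.1 + 1 < a.length ∧ frB (L.take t) down = false) <;>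
        by_cases hPr : (cstar.2 + 1 < b.length ∧ frB (L.take t) right = false) <;>
          simp [hPd, hPr] <;> tauto
    dsimp only
    rw [hv2c, hres1]
    refine ih (t + 1) _ _ (by omega) ?_ ?_
    · -- the new heap is the new frontier
      have hFS := List.Perm.map (cellKey a b) (frontier_succ ha hb htlt)
      simp only [← hLdef, ← hcstar, ← hdown, ← hright, ← hfiltdef] at hFS
      by_cases hPd : (cstar.1 + 1 < a.length ∧ frB (L.take t) down = false) <;>
        by_cases hPr : (cstar.2 + 1 < b.length ∧ frB (L.take t) right = false)
      · rw [if_pos (hPd_iff.mpr hPd), if_pos (hPr_iff.mpr hPr), hkd hPd.1, hkr hPr.1]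
        rw [if_pos hPd, if_pos hPr] at hFS
        simp only [List.map_append, List.map_cons, List.map_nil] at hFS
        exact (cons_cons_perm _ _ hh1).trans hFS.symm
      · rw [if_pos (hPd_iff.mpr hPd), if_neg (fun hc => hPr (hPr_iff.mp hc)), hkd hPd.1]
        rw [if_pos hPd, if_neg hPr] at hFS
        simp only [List.map_append, List.map_cons, List.map_nil, List.append_nil] at hFS
        exact (cons_perm_append _ hh1).trans hFS.symm
      · rw [if_neg (fun hc => hPd (hPd_iff.mp hc)), if_pos (hPr_iff.mpr hPr), hkr hPr.1]
        rw [if_neg hPd, if_pos hPr] at hFS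
        simp only [List.map_append, List.map_cons, List.map_nil, List.append_nil] at hFS
        exact (cons_perm_append _ hh1).trans hFS.symm
      · rw [if_neg (fun hc => hPd (hPd_iff.mp hc)), if_neg (fun hc => hPr (hPr_iff.mp hc))]
        rw [if_neg hPd, if_neg hPr] at hFS
        simp only [List.map_append, List.map_nil, List.append_nil] at hFS
        exact hh1.trans hFS.symm
    · -- the new visited set
      intro x
      have hv3mem : (x ∈ (if (decide (j + 1 < (b.length : Int)) && !(PySem.Set.contains vis (i, j + 1)))
            then PySem.Set.add (if (decide (i + 1 < (a.length : Int)) && !(PySem.Set.contains vis (i + 1, j)))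
                then PySem.Set.add vis (i + 1, j) else vis) (i, j + 1)
            else (if (decide (i + 1 < (a.length : Int)) && !(PySem.Set.contains vis (i + 1, j)))
                then PySem.Set.add vis (i + 1, j) else vis))) ↔
          (x ∈ vis ∨ ((cstar.1 + 1 < a.length ∧ frB (L.take t) down = false) ∧ x = cellIdx down)
            ∨ ((cstar.2 + 1 < b.length ∧ frB (L.take t) right = false) ∧ x = cellIdx right)) := by
        by_cases hPd : (cstar.1 + 1 < a.length ∧ frB (L.take t) down = false) <;>
          by_cases hPr : (cstar.2 + 1 < b.length ∧ frB (L.take t) right = false)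
        · rw [if_pos (hPd_iff.mpr hPd), if_pos (hPr_iff.mpr hPr), hIdxD, hIdxR]
          simp [PySem.Set.mem_add, hPd, hPr]
          tauto
        · rw [if_pos (hPd_iff.mpr hPd), if_neg (fun hc => hPr (hPr_iff.mp hc)), hIdxD]
          simp [PySem.Set.mem_add, hPd, hPr]
        · rw [if_neg (fun hc => hPd (hPd_iff.mp hc)), if_pos (hPr_iff.mpr hPr), hIdxR]
          simp [PySem.Set.mem_add, hPd, hPr]
        · rw [if_neg (fun hc => hPd (hPd_iff.mp hc)), if_neg (fun hc => hPr (hPr_iff.mp hc))]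
          simp [hPd, hPr]
      rw [hv3mem]
      constructor
      · rintro (hx | ⟨hPd, rfl⟩ | ⟨hPr, rfl⟩)
        · obtain ⟨c, hcall, hcix, hc⟩ := (hvis x).mp hx
          refine ⟨c, hcall, hcix, ?_⟩
          rcases hc with hc | hc
          · exact Or.inl ((htake1 c).mpr (Or.inl hc))
          · rw [hfr] at hc
            rcases List.mem_cons.mp hc with rfl | hc
            · exact Or.inl ((htake1 _).mpr (Or.inr hcstar.symm))
            · exact Or.inr ((hF1 c).mpr (Or.inl hc))
        · refine ⟨down, ?_, rfl, Or.inr ((hF1 down).mpr (Or.inr (Or.inl ⟨hPd, rfl⟩)))⟩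
          rw [mem_allCells]
          exact ⟨by simp [hdown]; omega, by simp [hdown]; exact hcr.2⟩
        · refine ⟨right, ?_, rfl, Or.inr ((hF1 right).mpr (Or.inr (Or.inr ⟨hPr, rfl⟩)))⟩
          rw [mem_allCells]
          exact ⟨by simp [hright]; exact hcr.1, by simp [hright]; omega⟩
      · rintro ⟨c, hcall, hcix, hc | hc⟩
        · rcases (htake1 c).mp hc with hc' | rfl
          · exact Or.inl ((hvis x).mpr ⟨c, hcall, hcix, Or.inl hc'⟩)
          · refine Or.inl ((hvis x).mpr ⟨cstar, hcall, hcix, Or.inr ?_⟩)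
            rw [hfr]
            exact List.mem_cons_self
        · rcases (hF1 c).mp hc with hc' | ⟨hPd, rfl⟩ | ⟨hPr, rfl⟩
          · refine Or.inl ((hvis x).mpr ⟨c, hcall, hcix, Or.inr ?_⟩)
            rw [hfr]
            exact List.mem_cons_of_mem _ hc'
          · exact Or.inr (Or.inl ⟨hPd, hcix.symm⟩)
          · exact Or.inr (Or.inr ⟨hPr, hcix.symm⟩)

lemma frontier_zero {a b : List Int} (ha0 : a ≠ []) (hb0 : b ≠ []) :
    pvFrontier a b 0 = [((0 : Nat), (0 : Nat))] := by
  unfold pvFrontier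
  rw [List.drop_zero, List.take_zero]
  apply filter_eq_singleton_of_nodup (sortedCells_nodup a b)
  · rw [sortedCells_mem]
    constructor <;> simp [List.length_pos_iff, ha0, hb0]
  · intro y _
    simp [frB]

lemma solve_eq_alt (A B : List Int) (C : Int) (hA : A ≠ []) (hB : B ≠ [])
    (hC : C ≤ (A.length : Int) * (B.length : Int)) :
    (let a := PySem.List.sorted A (fun x => x) true
     let b := PySem.List.sorted B (fun x => x) true
     let heap0 := [((-1) * ((PySem.List.pyGet? a 0).getD 0 + (PySem.List.pyGet? b 0).getD 0), (0 : Int), (0 : Int))]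
     let vis0 := PySem.Set.add PySem.Set.empty ((0 : Int), (0 : Int))
     loopA a b C C.toNat heap0 vis0 [])
    = (let a := PySem.List.sorted A (fun x => x) true
       let b := PySem.List.sorted B (fun x => x) true
       let sums := PySem.List.sorted (a.flatMap (fun x => b.map (fun y => x + y))) (fun s => s) true
       (PySem.List.pyRange 0 C 1).filterMap (fun k => PySem.List.pyGet? sums k)) := by
  dsimp only
  set a := PySem.List.sorted A (fun x => x) true with hadef
  set b := PySem.List.sorted B (fun x => x) true with hbdef
  have ha : a.Pairwise (fun x y => y ≤ x) := PySem.List.sorted_pairwise_rev A (fun x => x)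
  have hb : b.Pairwise (fun x y => y ≤ x) := PySem.List.sorted_pairwise_rev B (fun x => x)
  have hlena : a.length = A.length := (PySem.List.sorted_perm A (fun x => x) true).length_eq
  have hlenb : b.length = B.length := (PySem.List.sorted_perm B (fun x => x) true).length_eq
  have ha0 : a ≠ [] := fun h => hA ((PySem.List.sorted_eq_nil_iff A (fun x => x) true).mp h)
  have hb0 : b ≠ [] := fun h => hB ((PySem.List.sorted_eq_nil_iff B (fun x => x) true).mp h)
  have hcast : ((a.length * b.length : Nat) : Int) = (A.length : Int) * (B.length : Int) := by
    rw [hlena, hlenb]; push_cast; ring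
  have hCle : C.toNat ≤ a.length * b.length := by omega
  have hapos : 0 < a.length := List.length_pos_iff.mpr ha0
  have hbpos : 0 < b.length := List.length_pos_iff.mpr hb0
  -- initial heap and visited set
  have hget0a : (PySem.List.pyGet? a 0).getD 0 = a.getD 0 0 := by
    have := pyGetD_eq_getD a 0 hapos
    simpa using this
  have hget0b : (PySem.List.pyGet? b 0).getD 0 = b.getD 0 0 := by
    have := pyGetD_eq_getD b 0 hbpos
    simpa using this
  have hfr0 := frontier_zero ha0 hb0
  have hheap0 : [((-1) * ((PySem.List.pyGet? a 0).getD 0 + (PySem.List.pyGet? b 0).getD 0), (0 : Int), (0 : Int))].Perm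
      ((pvFrontier a b 0).map (cellKey a b)) := by
    rw [hfr0, hget0a, hget0b]
    apply List.Perm.of_eq
    simp only [List.map_cons, List.map_nil, cellKey, cellVal]
    norm_num
  have hvis0 : ∀ x : Int × Int, x ∈ PySem.Set.add PySem.Set.empty ((0 : Int), (0 : Int)) ↔
      ∃ c, c ∈ allCells a.length b.length ∧ cellIdx c = x ∧
        (c ∈ (sortedCells a b).take 0 ∨ c ∈ pvFrontier a b 0) := by
    intro x
    rw [hfr0]
    constructor
    · intro hx
      have hx0 : x = ((0 : Int), (0 : Int)) := by
        rcases PySem.Set.mem_add PySem.Set.empty _ x |>.mp hx with h | h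
        · cases h
        · exact h
      exact ⟨(0, 0), by rw [mem_allCells]; exact ⟨hapos, hbpos⟩,
        by rw [hx0]; rfl, Or.inr (by simp)⟩
    · rintro ⟨c, _, hcx, hc | hc⟩
      · simp at hc
      · simp only [List.mem_singleton] at hc
        subst hc
        rw [← hcx]
        exact (PySem.Set.mem_add _ _ _).mpr (Or.inr rfl)
  have hA_side := loopA_inv a b C ha hb hCle C.toNat 0 _ _ (by omega) hheap0 hvis0
  simp only [List.take_zero, List.map_nil] at hA_side
  rw [hA_side]
  -- B side
  rw [sums_eq a b]
  have hlenmap : ((((sortedCells a b).map (cellVal a b)).length : Nat) : Int)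
      = ((a.length * b.length : Nat) : Int) := by
    rw [List.length_map, sortedCells_length]
  rw [filterMap_pyRange_take _ _ (by rw [hlenmap]; omega)]
  rw [← List.map_take]

-- ===== VERDICT (by name: the statement is the Claim_ definition above) =====
theorem solve_spec : Claim_equal_solve := by
  intro A B C _ hPre
  unfold Spec_solve solve solve_alt
  exact solve_eq_alt A B C hPre.1 hPre.2.1 hPre.2.2
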